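-- pv_equiv track=rewrite | github.com/dgleich/more-graphs | maddow-show/maddow-data-scrapping.py | removeNamePrefix
-- ===== SOURCE A (Python) =====
-- def removeNamePrefix(name):
--     '''correct names starting w/ salutation or containing quotes'''
--     prefixes = ['Dr.','Rep.', 'Sen.','Senator','Maj.','Lt. Col.','Col.','Brig. Gen.','Sgt.',
--                 'Gov.','Rev.','Rep.-elect', 'Major','Maj. Gen.','Lt.','Sgt. Maj.','Capt.',
--                 'Lieutenant Colonel','Chef', 'Fmr. Rep.','Rep.','brig.', 'lieutenant',
--                 'colonel','fmr.','gen.', 'bishop']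
--
--     prefixes = list(map(lambda x:x.lower(),prefixes))
--     try:
--         #if name has space and there's a prefix then remove it
--         ind = name.index(' ')
--         first = name[:ind].lower()
--
--         while first in prefixes:
--             name = name[ind+1:]
--             try:
--                 ind = name.index(' ')
--                 first = name[:ind].lower()
--             except:
--                 break
--     except:
--         return name
--
--     return name
-- ===== SOURCE B (Python) =====
-- PREFIX_SET = {'dr.', 'rep.', 'sen.', 'senator', 'maj.', 'lt. col.', 'col.',
--               'brig. gen.', 'sgt.', 'gov.', 'rev.', 'rep.-elect', 'major',
--               'maj. gen.', 'lt.', 'sgt. maj.', 'capt.', 'lieutenant colonel',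
--               'chef', 'fmr. rep.', 'brig.', 'lieutenant', 'colonel', 'fmr.',
--               'gen.', 'bishop'}
--
-- def removeNamePrefix(name):
--     '''correct names starting w/ salutation or containing quotes'''
--     try:
--         parts = name.split(' ')
--     except AttributeError:
--         return name
--     k = 0
--     while k < len(parts) - 1 and parts[k].lower() in PREFIX_SET:
--         k += 1
--     return ' '.join(parts[k:])
-- ===== Notes on version B (the rewrite author's own statement) =====
-- stated objective: simpler
-- what changed: A repeatedly re-slices the string and re-searches for the next space in a while loop with nested try/except; B splits the string once on the space separator, counts the leading run of salutation words in one pass (never counting the final word), and joins the remaining words back.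
import Mathlib
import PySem

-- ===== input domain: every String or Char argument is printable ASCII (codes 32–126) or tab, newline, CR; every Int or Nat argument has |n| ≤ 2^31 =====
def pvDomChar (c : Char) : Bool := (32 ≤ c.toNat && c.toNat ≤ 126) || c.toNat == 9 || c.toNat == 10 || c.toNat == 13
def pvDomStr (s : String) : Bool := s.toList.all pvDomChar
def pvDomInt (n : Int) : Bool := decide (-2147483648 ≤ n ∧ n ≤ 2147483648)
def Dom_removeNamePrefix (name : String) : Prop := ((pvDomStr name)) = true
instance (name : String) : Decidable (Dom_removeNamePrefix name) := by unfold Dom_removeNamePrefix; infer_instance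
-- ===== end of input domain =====

-- B replaces A's while loop of repeated string re-slicing and re-searching by a single
-- split(' '), one forward count of leading salutation words (never the last word), and one join (objective: simpler).

-- ===== PORT A =====
-- prefixes = list(map(lambda x: x.lower(), [...]))
def pvPrefixesA : List (List Char) :=
  (["Dr.", "Rep.", "Sen.", "Senator", "Maj.", "Lt. Col.", "Col.", "Brig. Gen.", "Sgt.",
    "Gov.", "Rev.", "Rep.-elect", "Major", "Maj. Gen.", "Lt.", "Sgt. Maj.", "Capt.",
    "Lieutenant Colonel", "Chef", "Fmr. Rep.", "Rep.", "brig.", "lieutenant",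
    "colonel", "fmr.", "gen.", "bishop"].map (fun x => PySem.Chars.lower x.toList))

-- the while loop; `ind` is always a found index of ' ' (so ≥ 0), hence the slices
-- name[:ind] / name[ind+1:] are exactly take / drop here
def removeNamePrefixGo (name : List Char) (ind : Nat) (first : List Char) : List Char :=
  if first ∈ pvPrefixesA then
    -- name = name[ind+1:]
    if h : PySem.Chars.find (name.drop (ind + 1)) [' '] = -1 then
      name.drop (ind + 1)                     -- inner except (no ' ' left): break, then return name
    else
      removeNamePrefixGo (name.drop (ind + 1))
        (PySem.Chars.find (name.drop (ind + 1)) [' ']).toNat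
        (PySem.Chars.lower ((name.drop (ind + 1)).take
          (PySem.Chars.find (name.drop (ind + 1)) [' ']).toNat))
  else name
termination_by name.length
decreasing_by
  have hne : name.drop (ind + 1) ≠ [] := by
    intro he; rw [he] at h; exact h rfl
  have := List.length_drop (l := name) (i := ind + 1)
  have h0 : (name.drop (ind + 1)).length ≠ 0 := by
    simpa using List.length_eq_zero_iff.not.mpr hne
  omega

-- name.index(' ') raising ValueError is PySem.Chars.find = -1 (outer except: return name unchanged)
def removeNamePrefix (name : String) : String :=
  let ind := PySem.Chars.find name.toList [' ']
  if ind = -1 then name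
  else String.ofList
    (removeNamePrefixGo name.toList ind.toNat
      (PySem.Chars.lower (name.toList.take ind.toNat)))

-- ===== PORT B =====
-- PREFIX_SET = {...} (Python set literal of the lowercased prefixes)
def pvPrefixSetB : PySem.Set (List Char) :=
  PySem.Set.ofList
    (["dr.", "rep.", "sen.", "senator", "maj.", "lt. col.", "col.", "brig. gen.", "sgt.",
      "gov.", "rev.", "rep.-elect", "major", "maj. gen.", "lt.", "sgt. maj.", "capt.",
      "lieutenant colonel", "chef", "fmr. rep.", "brig.", "lieutenant",
      "colonel", "fmr.", "gen.", "bishop"].map String.toList)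

-- while k < len(parts) - 1 and parts[k].lower() in PREFIX_SET: k += 1
def removeNamePrefixAltCount : List (List Char) → Nat
  | p :: rest@(_ :: _) =>
      if PySem.Chars.lower p ∈ pvPrefixSetB then removeNamePrefixAltCount rest + 1 else 0
  | _ => 0

def removeNamePrefix_alt (name : String) : String :=
  let parts := PySem.Chars.splitOn name.toList [' ']      -- name.split(' ')
  String.ofList (PySem.Chars.join [' '] (parts.drop (removeNamePrefixAltCount parts)))

-- ===== PRECONDITION & SPEC =====
def Spec_removeNamePrefix (name : String) (out : String) : Prop := out = removeNamePrefix_alt name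
instance (name : String) (out : String) : Decidable (Spec_removeNamePrefix name out) := by unfold Spec_removeNamePrefix; infer_instance

-- ===== CLAIM (what is proved, stated in full; the proofs are below) =====
def Claim_equal_removeNamePrefix : Prop := ∀ (name : String), Dom_removeNamePrefix name → Spec_removeNamePrefix name (removeNamePrefix name)

-- ===== LEMMAS AND PROOFS =====

-- PySem.Chars.find.go on a one-character needle is List.idxOf with an offset
theorem pvFindGo (c : Char) (l : List Char) : ∀ k : Nat,
    PySem.Chars.find.go [c] l k = if c ∈ l then ((k : Int) + l.idxOf c) else -1 := by
  induction l with
  | nil => intro k; simp [PySem.Chars.find.go]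
  | cons x t ih =>
    intro k
    rw [PySem.Chars.find.go]
    by_cases hx : x = c
    · subst hx
      simp [List.isPrefixOf]
    · have hpf : List.isPrefixOf [c] (x :: t) = false := by
        simp [List.isPrefixOf]; exact fun h => absurd h.symm hx
      have hbx : (x == c) = false := by simp [hx]
      have hx' : ¬ c = x := fun h => hx h.symm
      rw [hpf]
      simp only [ih (k+1), List.idxOf_cons, List.mem_cons, hbx, cond_false]
      by_cases hm : c ∈ t
      · simp [hm]; ring
      · simp [hm, hx']

theorem pvFind_singleton (c : Char) (cs : List Char) :
    PySem.Chars.find cs [c] = if c ∈ cs then (cs.idxOf c : Int) else -1 := by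
  have := pvFindGo c cs 0
  simpa [PySem.Chars.find] using this

-- PySem.Chars.splitOn.go on a one-character separator, with its accumulators made explicit
theorem pvSplitOnGo (c : Char) (l : List Char) : ∀ (fuel : Nat) (cur : List Char) (acc : List (List Char)),
    l.length < fuel →
    PySem.Chars.splitOn.go [c] fuel l cur acc
      = acc.reverse ++ List.modifyHead (cur.reverse ++ ·) (List.splitOnP (· == c) l) := by
  induction l with
  | nil =>
    intro fuel cur acc hf
    cases fuel with
    | zero => omega
    | succ f =>
      rw [PySem.Chars.splitOn.go]
      all_goals simp [List.splitOnP_nil]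
  | cons x t ih =>
    intro fuel cur acc hf
    cases fuel with
    | zero => omega
    | succ fuel =>
      rw [PySem.Chars.splitOn.go]
      by_cases hx : x = c
      · subst hx
        have hpf : List.isPrefixOf [x] (x :: t) = true := by simp [List.isPrefixOf]
        rw [if_pos hpf]
        have hdrop : List.drop [x].length (x :: t) = t := rfl
        rw [hdrop, ih fuel [] (cur.reverse :: acc) (by simpa using hf)]
        obtain ⟨_h, tl, he⟩ := List.exists_cons_of_ne_nil (List.splitOnP_ne_nil (· == x) t)
        simp [List.splitOnP_cons, he]
      · have hpf : List.isPrefixOf [c] (x :: t) = false := by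
          simp [List.isPrefixOf]; exact fun h => absurd h.symm hx
        have hbx : (x == c) = false := by simp [hx]
        rw [if_neg (by simp [hpf])]
        rw [ih fuel (x :: cur) acc (by simpa using hf)]
        simp only [List.splitOnP_cons, hbx, Bool.false_eq_true, if_false]
        obtain ⟨_h, tl, he⟩ := List.exists_cons_of_ne_nil (List.splitOnP_ne_nil (· == c) t)
        simp [he]

theorem pvSplitOn_singleton (c : Char) (cs : List Char) :
    PySem.Chars.splitOn cs [c] = List.splitOnP (· == c) cs := by
  rw [PySem.Chars.splitOn, pvSplitOnGo c cs (cs.length + 1) [] [] (by omega)]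
  obtain ⟨_h, tl, he⟩ := List.exists_cons_of_ne_nil (List.splitOnP_ne_nil (· == c) cs)
  simp [he]

theorem pvSplitOnP_not_mem (c : Char) (cs : List Char) (h : c ∉ cs) :
    List.splitOnP (· == c) cs = [cs] := by
  induction cs with
  | nil => simp [List.splitOnP_nil]
  | cons x t ih =>
    simp only [List.mem_cons, not_or] at h
    have hbx : (x == c) = false := by simp; exact fun he => h.1 he.symm
    rw [List.splitOnP_cons, hbx]
    simp [ih h.2]

theorem pvSplitOnP_mem (c : Char) (cs : List Char) (h : c ∈ cs) :
    List.splitOnP (· == c) cs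
      = cs.take (cs.idxOf c) :: List.splitOnP (· == c) (cs.drop (cs.idxOf c + 1)) := by
  induction cs with
  | nil => simp at h
  | cons x t ih =>
    by_cases hx : x = c
    · subst hx
      simp [List.splitOnP_cons]
    · have hbx : (x == c) = false := by simp [hx]
      have hm : c ∈ t := by
        cases List.mem_cons.mp h with
        | inl h1 => exact absurd h1.symm hx
        | inr h1 => exact h1
      rw [List.splitOnP_cons, hbx]
      simp only [Bool.false_eq_true, if_false, ih hm, List.idxOf_cons, hbx, cond_false]
      simp

theorem pvJoin_splitOnP (c : Char) (cs : List Char) :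
    PySem.Chars.join [c] (List.splitOnP (· == c) cs) = cs := by
  have := List.intercalate_splitOn cs c
  simpa [PySem.Chars.join, List.splitOn] using this

-- A's lowered prefix list and B's prefix set hold the same elements
theorem pvPrefixes_mem_iff (x : List Char) : x ∈ pvPrefixesA ↔ x ∈ pvPrefixSetB := by
  have h : PySem.Set.ofList pvPrefixesA = pvPrefixSetB := by decide
  rw [← h, PySem.Set.mem_ofList]

-- the main invariant: A's slicing loop computes B's split-count-join, by strong induction on the length
theorem pvMainAux : ∀ (n : Nat) (cs : List Char), cs.length ≤ n →
    (if h : PySem.Chars.find cs [' '] = -1 then cs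
     else removeNamePrefixGo cs (PySem.Chars.find cs [' ']).toNat
            (PySem.Chars.lower (cs.take (PySem.Chars.find cs [' ']).toNat)))
    = PySem.Chars.join [' ']
        ((PySem.Chars.splitOn cs [' ']).drop
          (removeNamePrefixAltCount (PySem.Chars.splitOn cs [' ']))) := by
  intro n
  induction n with
  | zero =>
    intro cs hlen
    have : cs = [] := List.eq_nil_of_length_eq_zero (Nat.le_zero.mp hlen)
    subst this
    rw [pvSplitOn_singleton, List.splitOnP_nil]
    simp [removeNamePrefixAltCount, PySem.Chars.join_singleton]
    decide
  | succ n ih =>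
    intro cs hlen
    rw [pvSplitOn_singleton]
    by_cases hm : ' ' ∈ cs
    · have hidx : cs.idxOf ' ' < cs.length := List.idxOf_lt_length_of_mem hm
      have hfind : PySem.Chars.find cs [' '] = (cs.idxOf ' ' : Int) := by
        rw [pvFind_singleton]; simp [hm]
      have hne : ¬ (PySem.Chars.find cs [' '] = -1) := by rw [hfind]; omega
      rw [dif_neg hne, hfind]
      simp only [Int.toNat_natCast]
      rw [pvSplitOnP_mem ' ' cs hm]
      obtain ⟨q, tl, hq⟩ := List.exists_cons_of_ne_nil
        (List.splitOnP_ne_nil (· == ' ') (cs.drop (cs.idxOf ' ' + 1)))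
      rw [removeNamePrefixGo]
      by_cases hp : PySem.Chars.lower (cs.take (cs.idxOf ' ')) ∈ pvPrefixesA
      · rw [if_pos hp]
        have hrec := ih (cs.drop (cs.idxOf ' ' + 1)) (by
          have := List.length_drop (l := cs) (i := cs.idxOf ' ' + 1)
          omega)
        rw [pvSplitOn_singleton] at hrec
        have hpB : PySem.Chars.lower (cs.take (cs.idxOf ' ')) ∈ pvPrefixSetB :=
          (pvPrefixes_mem_iff _).mp hp
        have hcount : removeNamePrefixAltCount (cs.take (cs.idxOf ' ') :: q :: tl)
            = removeNamePrefixAltCount (q :: tl) + 1 := by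
          simp [removeNamePrefixAltCount, hpB]
        rw [hq] at hrec
        rw [hrec, hq, hcount, List.drop_succ_cons]
      · rw [if_neg hp]
        have hpB : PySem.Chars.lower (cs.take (cs.idxOf ' ')) ∉ pvPrefixSetB :=
          fun h => hp ((pvPrefixes_mem_iff _).mpr h)
        have hcount : removeNamePrefixAltCount (cs.take (cs.idxOf ' ') :: q :: tl) = 0 := by
          simp [removeNamePrefixAltCount, hpB]
        rw [hq, hcount, List.drop_zero, ← hq, ← pvSplitOnP_mem ' ' cs hm]
        exact (pvJoin_splitOnP ' ' cs).symm
    · have hfind : PySem.Chars.find cs [' '] = -1 := by rw [pvFind_singleton]; simp [hm]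
      rw [dif_pos hfind, pvSplitOnP_not_mem ' ' cs hm]
      simp [removeNamePrefixAltCount, PySem.Chars.join_singleton]

-- ===== VERDICT (by name: the statement is the Claim_ definition above) =====
theorem removeNamePrefix_spec : Claim_equal_removeNamePrefix := by
  intro name _
  unfold Spec_removeNamePrefix removeNamePrefix removeNamePrefix_alt
  have h := pvMainAux name.toList.length name.toList le_rfl
  by_cases hf : PySem.Chars.find name.toList [' '] = -1
  · simp only [hf, dif_pos] at h
    simp [hf, ← h, String.ofList_toList]
  · simp only [hf, dif_neg, not_false_iff] at h
    simp [hf, h]
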